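-- pv_equiv track=rewrite | github.com/TiagoGSouza/MATA64 | wumpus.py | flecha_mata_wumpus
-- ===== SOURCE A (Python) =====
-- estados_limite_cima = [12, 13, 14, 15]
--
-- estados_limite_baixo = [0, 1, 2, 3]
--
-- estados_limite_direita = [3, 7, 11, 15]
--
-- estados_limite_esquerda = [0, 4, 8, 12]
--
-- estado_wumpus = 8
--
-- def flecha_mata_wumpus(estado_guerreiro, face_guerreiro, wumpus_vivo, flechas_guerreiro):
--     if not wumpus_vivo:
--         return False
--
--     if flechas_guerreiro == 0:
--         return False
--
--     estado_flecha = estado_guerreiro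
--
--     if face_guerreiro == 1: #guerreiro esta olhando pro norte
--         while estado_flecha not in estados_limite_cima:
--             if(estado_flecha == estado_wumpus):
--                 wumpus_vivo = False
--                 return True
--             estado_flecha += 4
--         return False
--
--     elif face_guerreiro == 2: #guerreiro esta olhando pra esquerda
--         while estado_flecha not in estados_limite_esquerda:
--             if(estado_flecha == estado_wumpus):
--                 wumpus_vivo = False
--                 return True
--             estado_flecha -= 1
--         return False
--
--     elif face_guerreiro == 3: #guerreiro esta olhando pra direita
--         while estado_flecha not in estados_limite_direita:
--             if(estado_flecha == estado_wumpus):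
--                 wumpus_vivo = False
--                 return True
--             estado_flecha += 1
--         return False
--
--     else: #guerreiro esta olhando pro sul
--         while estado_flecha not in estados_limite_baixo:
--             if(estado_flecha == estado_wumpus):
--                 wumpus_vivo = False
--                 return True
--             estado_flecha -= 4
--         return False
-- ===== SOURCE B (Python) =====
-- def flecha_mata_wumpus(estado_guerreiro, face_guerreiro, wumpus_vivo, flechas_guerreiro):
--     if not wumpus_vivo or flechas_guerreiro == 0:
--         return False
--     linha, coluna = divmod(estado_guerreiro, 4)
--     if face_guerreiro == 1:      # north: hits cell 8 iff same column 0 and at/below row 2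
--         return coluna == 0 and linha <= 2
--     if face_guerreiro == 2:      # west: cell 8 is a wall cell, the arrow can never pass it
--         return False
--     if face_guerreiro == 3:      # east: only a shot from cell 8 itself hits
--         return estado_guerreiro == 8
--     return coluna == 0 and linha >= 2   # south
-- ===== Notes on version B (the rewrite author's own statement) =====
-- stated objective: simpler
-- what changed: Replaced the four step-by-step arrow-marching while loops with a closed-form row/column alignment check (divmod by 4) against the fixed wumpus cell 8.
import Mathlib
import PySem

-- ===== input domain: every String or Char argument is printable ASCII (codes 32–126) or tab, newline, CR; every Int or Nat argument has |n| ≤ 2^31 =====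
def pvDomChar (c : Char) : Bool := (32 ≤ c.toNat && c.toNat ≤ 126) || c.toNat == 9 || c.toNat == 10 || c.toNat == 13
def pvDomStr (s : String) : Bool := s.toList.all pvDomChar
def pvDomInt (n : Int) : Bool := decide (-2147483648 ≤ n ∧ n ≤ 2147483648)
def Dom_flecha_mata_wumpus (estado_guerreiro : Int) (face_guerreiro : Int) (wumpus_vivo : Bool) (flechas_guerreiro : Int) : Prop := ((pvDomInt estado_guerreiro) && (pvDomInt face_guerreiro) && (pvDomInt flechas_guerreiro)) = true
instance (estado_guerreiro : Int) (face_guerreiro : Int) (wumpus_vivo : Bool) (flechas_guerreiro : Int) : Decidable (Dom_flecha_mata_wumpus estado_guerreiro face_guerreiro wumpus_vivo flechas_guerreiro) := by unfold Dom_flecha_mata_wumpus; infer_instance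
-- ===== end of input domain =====

-- B replaces A's four arrow-marching while loops by a closed-form row/column alignment
-- check against the fixed wumpus cell 8 (objective: simpler).

-- ===== PORT A =====
-- Each Python 'while' loop is ported as a fuel recursion; the fuel passed at the call
-- site strictly exceeds the number of iterations on every terminating input (Pre_),
-- so on Pre_ the port computes exactly A's value.
def pvLoopNorte : Nat → Int → Bool
  | 0, _ => false
  | f + 1, e =>
    if ([12, 13, 14, 15] : List Int).contains e then false
    else if e = 8 then true
    else pvLoopNorte f (e + 4)

def pvLoopOeste : Nat → Int → Bool
  | 0, _ => false
  | f + 1, e =>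
    if ([0, 4, 8, 12] : List Int).contains e then false
    else if e = 8 then true
    else pvLoopOeste f (e - 1)

def pvLoopLeste : Nat → Int → Bool
  | 0, _ => false
  | f + 1, e =>
    if ([3, 7, 11, 15] : List Int).contains e then false
    else if e = 8 then true
    else pvLoopLeste f (e + 1)

def pvLoopSul : Nat → Int → Bool
  | 0, _ => false
  | f + 1, e =>
    if ([0, 1, 2, 3] : List Int).contains e then false
    else if e = 8 then true
    else pvLoopSul f (e - 4)

def flecha_mata_wumpus (estado_guerreiro : Int) (face_guerreiro : Int) (wumpus_vivo : Bool) (flechas_guerreiro : Int) : Bool :=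
  if !wumpus_vivo then false
  else if flechas_guerreiro = 0 then false
  else
    let estado_flecha := estado_guerreiro
    if face_guerreiro = 1 then pvLoopNorte ((15 - estado_flecha).toNat + 1) estado_flecha
    else if face_guerreiro = 2 then pvLoopOeste (estado_flecha.toNat + 1) estado_flecha
    else if face_guerreiro = 3 then pvLoopLeste ((15 - estado_flecha).toNat + 1) estado_flecha
    else pvLoopSul (estado_flecha.toNat + 1) estado_flecha

-- ===== PORT B =====
def flecha_mata_wumpus_alt (estado_guerreiro : Int) (face_guerreiro : Int) (wumpus_vivo : Bool) (flechas_guerreiro : Int) : Bool :=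
  if !wumpus_vivo || flechas_guerreiro = 0 then false
  else
    let linha := PySem.Int.floordiv estado_guerreiro 4
    let coluna := PySem.Int.mod estado_guerreiro 4
    if face_guerreiro = 1 then coluna = 0 && linha ≤ 2
    else if face_guerreiro = 2 then false
    else if face_guerreiro = 3 then estado_guerreiro = 8
    else coluna = 0 && 2 ≤ linha

-- ===== PRECONDITION & SPEC =====
-- Pre_ excludes exactly the inputs on which A diverges: when both guards pass, an arrow
-- shot from a cell beyond the boundary in its facing direction never reaches a boundary
-- cell and A's while loop runs forever.
def Pre_flecha_mata_wumpus (estado_guerreiro : Int) (face_guerreiro : Int) (wumpus_vivo : Bool) (flechas_guerreiro : Int) : Prop :=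
  wumpus_vivo = false ∨ flechas_guerreiro = 0 ∨
    (if face_guerreiro = 1 ∨ face_guerreiro = 3 then estado_guerreiro ≤ 15 else 0 ≤ estado_guerreiro)
instance (estado_guerreiro : Int) (face_guerreiro : Int) (wumpus_vivo : Bool) (flechas_guerreiro : Int) : Decidable (Pre_flecha_mata_wumpus estado_guerreiro face_guerreiro wumpus_vivo flechas_guerreiro) := by unfold Pre_flecha_mata_wumpus; infer_instance

def pvWitness_flecha_mata_wumpus : Int × Int × Bool × Int := (0, 1, true, 2)

def Spec_flecha_mata_wumpus (estado_guerreiro : Int) (face_guerreiro : Int) (wumpus_vivo : Bool) (flechas_guerreiro : Int) (out : Bool) : Prop := out = flecha_mata_wumpus_alt estado_guerreiro face_guerreiro wumpus_vivo flechas_guerreiro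
instance (estado_guerreiro : Int) (face_guerreiro : Int) (wumpus_vivo : Bool) (flechas_guerreiro : Int) (out : Bool) : Decidable (Spec_flecha_mata_wumpus estado_guerreiro face_guerreiro wumpus_vivo flechas_guerreiro out) := by unfold Spec_flecha_mata_wumpus; infer_instance

-- ===== CLAIM (what is proved, stated in full; the proofs are below) =====
def Claim_equal_flecha_mata_wumpus : Prop := ∀ (estado_guerreiro : Int) (face_guerreiro : Int) (wumpus_vivo : Bool) (flechas_guerreiro : Int), Dom_flecha_mata_wumpus estado_guerreiro face_guerreiro wumpus_vivo flechas_guerreiro → Pre_flecha_mata_wumpus estado_guerreiro face_guerreiro wumpus_vivo flechas_guerreiro → Spec_flecha_mata_wumpus estado_guerreiro face_guerreiro wumpus_vivo flechas_guerreiro (flecha_mata_wumpus estado_guerreiro face_guerreiro wumpus_vivo flechas_guerreiro)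

-- ===== LEMMAS AND PROOFS =====

theorem pvLoopNorte_eq (f : Nat) : ∀ (e : Int), e ≤ 15 → 15 - e < 4 * (f : Int) →
    pvLoopNorte f e = decide (e % 4 = 0 ∧ e ≤ 8) := by
  induction f with
  | zero => intro e h1 h2; omega
  | succ f ih =>
    intro e h1 h2
    simp only [pvLoopNorte, List.contains_eq_mem, List.mem_cons, List.not_mem_nil]
    by_cases hs : e = 12 ∨ e = 13 ∨ e = 14 ∨ e = 15
    · rw [if_pos (by simpa using hs)]
      rcases hs with h | h | h | h <;> subst h <;> decide
    · rw [if_neg (by simpa using hs)]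
      by_cases h8 : e = 8
      · rw [if_pos h8]; subst h8; decide
      · rw [if_neg h8, ih (e + 4) (by omega) (by push_cast; omega)]
        simp only [decide_eq_decide]
        omega

theorem pvLoopOeste_eq (f : Nat) : ∀ (e : Int), 0 ≤ e → e < (f : Int) →
    pvLoopOeste f e = false := by
  induction f with
  | zero => intro e h1 h2; omega
  | succ f ih =>
    intro e h1 h2
    simp only [pvLoopOeste, List.contains_eq_mem, List.mem_cons, List.not_mem_nil]
    by_cases hs : e = 0 ∨ e = 4 ∨ e = 8 ∨ e = 12
    · rw [if_pos (by simpa using hs)]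
    · rw [if_neg (by simpa using hs), if_neg (by omega)]
      exact ih (e - 1) (by omega) (by push_cast at h2 ⊢; omega)

theorem pvLoopLeste_eq (f : Nat) : ∀ (e : Int), e ≤ 15 → 15 - e < (f : Int) →
    pvLoopLeste f e = decide (e = 8) := by
  induction f with
  | zero => intro e h1 h2; omega
  | succ f ih =>
    intro e h1 h2
    simp only [pvLoopLeste, List.contains_eq_mem, List.mem_cons, List.not_mem_nil]
    by_cases hs : e = 3 ∨ e = 7 ∨ e = 11 ∨ e = 15
    · rw [if_pos (by simpa using hs)]
      rcases hs with h | h | h | h <;> subst h <;> decide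
    · rw [if_neg (by simpa using hs)]
      by_cases h8 : e = 8
      · rw [if_pos h8]; subst h8; decide
      · rw [if_neg h8, ih (e + 1) (by omega) (by push_cast at h2 ⊢; omega)]
        simp only [decide_eq_decide]
        omega

theorem pvLoopSul_eq (f : Nat) : ∀ (e : Int), 0 ≤ e → e < (f : Int) →
    pvLoopSul f e = decide (e % 4 = 0 ∧ 8 ≤ e) := by
  induction f with
  | zero => intro e h1 h2; omega
  | succ f ih =>
    intro e h1 h2
    simp only [pvLoopSul, List.contains_eq_mem, List.mem_cons, List.not_mem_nil]
    by_cases hs : e = 0 ∨ e = 1 ∨ e = 2 ∨ e = 3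
    · rw [if_pos (by simpa using hs)]
      rcases hs with h | h | h | h <;> subst h <;> decide
    · rw [if_neg (by simpa using hs)]
      by_cases h8 : e = 8
      · rw [if_pos h8]; subst h8; decide
      · rw [if_neg h8, ih (e - 4) (by omega) (by push_cast at h2 ⊢; omega)]
        simp only [decide_eq_decide]
        omega

-- ===== VERDICT (by name: the statement is the Claim_ definition above) =====
theorem flecha_mata_wumpus_spec : Claim_equal_flecha_mata_wumpus := by
  intro e face w fl _hdom hpre
  unfold Spec_flecha_mata_wumpus Pre_flecha_mata_wumpus at *
  have hmod : PySem.Int.mod e 4 = e % 4 :=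
    PySem.Int.mod_eq_emod_of_pos (by norm_num)
  have hdiv : PySem.Int.floordiv e 4 = e / 4 :=
    PySem.Int.floordiv_eq_ediv_of_pos (by norm_num)
  cases w with
  | false => simp [flecha_mata_wumpus, flecha_mata_wumpus_alt]
  | true =>
    by_cases hfl : fl = 0
    · simp [flecha_mata_wumpus, flecha_mata_wumpus_alt, hfl]
    · by_cases h1 : face = 1
      · have he : e ≤ 15 := by simp [h1, hfl] at hpre; exact hpre
        simp only [flecha_mata_wumpus, flecha_mata_wumpus_alt]
        simp only [h1, hfl, Bool.not_true, Bool.false_or, decide_eq_true_eq,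
          if_neg (Bool.false_ne_true), if_neg hfl, if_pos rfl]
        rw [pvLoopNorte_eq ((15 - e).toNat + 1) e he (by omega), hmod, hdiv, ← Bool.decide_and]
        exact decide_eq_decide.mpr (by omega)
      · by_cases h2 : face = 2
        · have he : 0 ≤ e := by simp [h1, h2, hfl] at hpre; exact hpre
          simp only [flecha_mata_wumpus, flecha_mata_wumpus_alt]
          simp only [h2, hfl, h1, Bool.not_true, Bool.false_or, decide_eq_true_eq,
            if_neg (Bool.false_ne_true), if_neg hfl, if_pos rfl,
            if_neg (by omega : ¬ (2 : Int) = 1)]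
          exact pvLoopOeste_eq (e.toNat + 1) e he (by omega)
        · by_cases h3 : face = 3
          · have he : e ≤ 15 := by simp [h3, hfl] at hpre; exact hpre
            simp only [flecha_mata_wumpus, flecha_mata_wumpus_alt]
            simp only [h3, hfl, Bool.not_true, Bool.false_or, decide_eq_true_eq,
              if_neg (Bool.false_ne_true), if_neg hfl, if_pos rfl,
              if_neg (by omega : ¬ (3 : Int) = 1), if_neg (by omega : ¬ (3 : Int) = 2)]
            exact pvLoopLeste_eq ((15 - e).toNat + 1) e he (by omega)
          · have he : 0 ≤ e := by simp [h1, h3, hfl] at hpre; exact hpre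
            simp only [flecha_mata_wumpus, flecha_mata_wumpus_alt]
            simp only [hfl, Bool.not_true, Bool.false_or, decide_eq_true_eq,
              if_neg (Bool.false_ne_true), if_neg hfl, if_neg h1, if_neg h2, if_neg h3]
            rw [pvLoopSul_eq (e.toNat + 1) e he (by omega), hmod, hdiv, ← Bool.decide_and]
            exact decide_eq_decide.mpr (by omega)
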